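-- pv_equiv track=rewrite | github.com/ekremdegirmnci/ImageProcessing | ImageProcessing/code/Main.py | misalign
-- ===== SOURCE A (Python) =====
-- def misalign(img_matrix):
--     for i in range(len(img_matrix) // 2 + 1):
--         for j in range(len(img_matrix[0])):
--             if j % 2 == 1 and i != len(img_matrix) // 2:
--                 a = img_matrix[i][j]
--                 b = img_matrix[len(img_matrix) - i - 1][j]
--                 img_matrix[i][j] = b
--                 img_matrix[len(img_matrix) - i - 1][j] = a
--     return img_matrix
-- ===== SOURCE B (Python) =====
-- def misalign(img_matrix):
--     n = len(img_matrix)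
--     w = len(img_matrix[0])
--     for j in range(1, w, 2):
--         col = [row[j] for row in img_matrix]
--         col.reverse()
--         for i in range(n):
--             img_matrix[i][j] = col[i]
--     return img_matrix
-- ===== Notes on version B (the rewrite author's own statement) =====
-- stated objective: simpler
-- what changed: B processes each odd-indexed column as a unit (extract the column, reverse it, write it back) instead of A's nested row-pair two-pointer swapping with parity and midpoint guards.
-- outside the precondition, e.g. on misalign([[1, 2], [3], [4, 5]]): A returns [[1, 5], [3], [4, 2]], B raises IndexError
import Mathlib
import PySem

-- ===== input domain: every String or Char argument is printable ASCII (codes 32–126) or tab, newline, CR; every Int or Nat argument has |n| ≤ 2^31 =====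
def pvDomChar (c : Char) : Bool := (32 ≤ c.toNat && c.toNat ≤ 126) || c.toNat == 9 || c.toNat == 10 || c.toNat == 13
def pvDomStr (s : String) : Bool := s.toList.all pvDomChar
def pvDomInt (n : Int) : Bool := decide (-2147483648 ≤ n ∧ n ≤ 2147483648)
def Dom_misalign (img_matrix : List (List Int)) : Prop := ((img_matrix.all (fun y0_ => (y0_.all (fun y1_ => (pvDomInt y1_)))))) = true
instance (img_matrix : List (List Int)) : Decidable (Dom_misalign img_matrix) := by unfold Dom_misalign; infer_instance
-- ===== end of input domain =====

-- B reverses each odd-indexed column as a unit (extract / reverse / write back) instead of A's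
-- nested row-pair swapping with parity and midpoint guards.  Both Pythons mutate the argument in
-- place and return it; the theorems here are about the returned value.

-- `m[i][j]` read and `m[i][j] = v` write (in range under Pre_; getD/set are the literal carriers)
def pvGet2 (m : List (List Int)) (i j : Nat) : Int := (m.getD i []).getD j 0
def pvSet2 (m : List (List Int)) (i j : Nat) (v : Int) : List (List Int) :=
  m.set i ((m.getD i []).set j v)

-- ===== PORT A =====
-- body of A's inner loop: 'if j % 2 == 1 and i != len(img_matrix) // 2: swap m[i][j], m[n-1-i][j]'
def stepA (i : Nat) (m : List (List Int)) (j : Nat) : List (List Int) :=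
  if j % 2 = 1 ∧ i ≠ m.length / 2 then
    let a := pvGet2 m i j
    let b := pvGet2 m (m.length - i - 1) j
    let m1 := pvSet2 m i j b
    pvSet2 m1 (m1.length - i - 1) j a
  else m

-- A's inner loop 'for j in range(len(img_matrix[0]))' (m[0] on the empty matrix raises; Pre_ excludes it)
def innerA (m : List (List Int)) (i : Nat) : List (List Int) :=
  (List.range (m.headD []).length).foldl (stepA i) m

def misalign (img_matrix : List (List Int)) : List (List Int) :=
  (List.range (img_matrix.length / 2 + 1)).foldl innerA img_matrix

-- ===== PORT B =====
-- body of B's outer loop: col = [row[j] for row in m]; col.reverse(); for i in range(n): m[i][j] = col[i]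
def stepB (n : Nat) (m : List (List Int)) (j : Int) : List (List Int) :=
  let jn := j.toNat   -- j comes from range(1, w, 2), hence is nonnegative
  let col := (m.map (fun row => row.getD jn 0)).reverse
  (List.range n).foldl (fun m i => pvSet2 m i jn (col.getD i 0)) m

def misalign_alt (img_matrix : List (List Int)) : List (List Int) :=
  let n := img_matrix.length
  let w := (img_matrix.headD []).length
  (PySem.List.pyRange 1 w 2).foldl (stepB n) img_matrix

-- ===== PRECONDITION & SPEC =====
-- Pre_ excludes the empty matrix (both A and B raise IndexError there) and ragged matrices having a
-- row shorter than the even-rounded first-row width 2*(w/2): on those A raises IndexError — except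
-- that A never reads the middle row of an odd-height matrix and so can still return while B's
-- column extraction raises IndexError there (see the cite in claim.json).
def Pre_misalign (img_matrix : List (List Int)) : Prop :=
  img_matrix ≠ [] ∧
    ∀ r ∈ img_matrix, 2 * ((img_matrix.headD []).length / 2) ≤ r.length
instance (img_matrix : List (List Int)) : Decidable (Pre_misalign img_matrix) := by
  unfold Pre_misalign; infer_instance

def pvWitness_misalign : List (List Int) := [[1, 2], [3, 4], [5, 6]]

def Spec_misalign (img_matrix : List (List Int)) (out : List (List Int)) : Prop := out = misalign_alt img_matrix
instance (img_matrix : List (List Int)) (out : List (List Int)) : Decidable (Spec_misalign img_matrix out) := by unfold Spec_misalign; infer_instance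

-- ===== CLAIM (what is proved, stated in full; the proofs are below) =====
def Claim_equal_misalign : Prop := ∀ (img_matrix : List (List Int)), Dom_misalign img_matrix → Pre_misalign img_matrix → Spec_misalign img_matrix (misalign img_matrix)

-- ===== LEMMAS AND PROOFS =====

theorem pv_getD_set {α : Type} (l : List α) (i j : Nat) (v : α) (d : α) :
    (l.set i v).getD j d = if j = i ∧ i < l.length then v else l.getD j d := by
  simp only [List.getD_eq_getElem?_getD, List.getElem?_set]
  split_ifs with h1 h2 h3 <;> simp_all

theorem pv_len_getD (m : List (List Int)) (i : Nat) :
    ((m.getD i []).length) = (m.map List.length).getD i 0 := by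
  induction m generalizing i with
  | nil => simp
  | cons r t ih =>
    cases i with
    | zero => simp
    | succ k =>
      have := ih k
      simpa [List.getD_eq_getElem?_getD] using this

theorem pvGet2_set2 (m : List (List Int)) (i j : Nat) (v : Int) (i' j' : Nat) :
    pvGet2 (pvSet2 m i j v) i' j' =
      if i' = i ∧ j' = j ∧ i < m.length ∧ j < (m.getD i []).length then v
      else pvGet2 m i' j' := by
  unfold pvGet2 pvSet2
  rw [pv_getD_set]
  by_cases hii : i' = i ∧ i < m.length
  · rw [if_pos hii, pv_getD_set]
    obtain ⟨hi, hl⟩ := hii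
    subst hi
    split_ifs with h1 h2 <;> tauto
  · rw [if_neg hii]
    split_ifs with h1 <;> tauto

theorem pvShape_set2 (m : List (List Int)) (i j : Nat) (v : Int) :
    (pvSet2 m i j v).map List.length = m.map List.length := by
  unfold pvSet2
  rw [List.map_set]
  apply List.ext_getElem?
  intro k
  simp only [List.getElem?_set, List.length_set, List.length_map]
  split_ifs with h1 h2
  · subst h1
    simp [List.getElem?_map, List.getElem?_eq_getElem h2]
  · subst h1
    rw [eq_comm, List.getElem?_map, List.getElem?_eq_none (by omega)]
    rfl
  · rfl

-- shape facts
theorem pvSh_len {m m0 : List (List Int)} (h : m.map List.length = m0.map List.length) :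
    m.length = m0.length := by
  have := congrArg List.length h; simpa using this

theorem pvSh_head {m m0 : List (List Int)} (h : m.map List.length = m0.map List.length) :
    (m.headD []).length = (m0.headD []).length := by
  have h0 := pv_len_getD m 0
  have h1 := pv_len_getD m0 0
  cases m <;> cases m0 <;> simp_all

theorem pvSh_row {m m0 : List (List Int)} (h : m.map List.length = m0.map List.length) (i : Nat) :
    (m.getD i []).length = (m0.getD i []).length := by
  rw [pv_len_getD, pv_len_getD, h]

theorem pvShape_foldWrite (jn : Nat) (v : Nat → Int) (k : Nat) (m : List (List Int)) :
    ((List.range k).foldl (fun m i => pvSet2 m i jn (v i)) m).map List.length = m.map List.length := by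
  induction k with
  | zero => simp
  | succ k ih =>
    rw [List.range_succ, List.foldl_append, List.foldl_cons, List.foldl_nil, pvShape_set2, ih]

theorem pvGet2_foldWrite (jn : Nat) (v : Nat → Int) (k : Nat) (m : List (List Int)) (i' j' : Nat) :
    pvGet2 ((List.range k).foldl (fun m i => pvSet2 m i jn (v i)) m) i' j' =
      if i' < k ∧ j' = jn ∧ i' < m.length ∧ jn < (m.getD i' []).length then v i'
      else pvGet2 m i' j' := by
  induction k with
  | zero => simp
  | succ k ih =>
    rw [List.range_succ, List.foldl_append, List.foldl_cons, List.foldl_nil, pvGet2_set2,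
      pvSh_len (pvShape_foldWrite jn v k m), pvSh_row (pvShape_foldWrite jn v k m) k, ih]
    by_cases hik : i' = k
    · subst hik
      split_ifs <;> first | rfl | omega
    · split_ifs <;> first | rfl | omega

theorem pv_colval (m : List (List Int)) (jn i : Nat) (hi : i < m.length) :
    ((m.map (fun row => row.getD jn 0)).reverse).getD i 0 = pvGet2 m (m.length - 1 - i) jn := by
  unfold pvGet2
  rw [List.getD_eq_getElem _ _ (by simpa using hi), List.getElem_reverse, List.getElem_map]
  simp only [List.length_map]
  rw [List.getD_eq_getElem _ _ (show m.length - 1 - i < m.length by omega)]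

theorem pvStepB (m0 m : List (List Int)) (hpre : Pre_misalign m0)
    (hsh : m.map List.length = m0.map List.length) (j : Int)
    (hodd : j.toNat % 2 = 1) (hjw : j.toNat < (m0.headD []).length) :
    (stepB m0.length m j).map List.length = m0.map List.length ∧
    ∀ i' j', pvGet2 (stepB m0.length m j) i' j' =
      if i' < m0.length ∧ j' = j.toNat then pvGet2 m (m0.length - 1 - i') j.toNat
      else pvGet2 m i' j' := by
  unfold stepB
  refine ⟨by rw [pvShape_foldWrite, hsh], ?_⟩
  intro i' j'
  rw [pvGet2_foldWrite j.toNat (fun i => ((m.map (fun row => row.getD j.toNat 0)).reverse).getD i 0)]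
  have hlen := pvSh_len hsh
  by_cases hc : i' < m0.length ∧ j' = j.toNat
  · obtain ⟨h1, h2⟩ := hc
    have hrow : j.toNat < (m.getD i' []).length := by
      rw [pvSh_row hsh]
      have := hpre.2 (m0.getD i' []) (by rw [List.getD_eq_getElem _ _ h1]; exact List.getElem_mem _)
      omega
    rw [if_pos ⟨by omega, h2, by omega, hrow⟩, if_pos ⟨h1, h2⟩, pv_colval m j.toNat i' (by omega),
      hlen]
  · rw [if_neg (by rw [hlen]; tauto), if_neg hc]

theorem pvB_inv (m0 : List (List Int)) (hpre : Pre_misalign m0) :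
    ∀ t, t ≤ (m0.headD []).length / 2 →
      (((List.range t).foldl (fun m (k : Nat) => stepB m0.length m (1 + 2 * (k : Int))) m0).map List.length
          = m0.map List.length) ∧
      ∀ i' j', pvGet2 ((List.range t).foldl (fun m (k : Nat) => stepB m0.length m (1 + 2 * (k : Int))) m0) i' j' =
        if j' % 2 = 1 ∧ j' < 2 * t ∧ i' < m0.length then pvGet2 m0 (m0.length - 1 - i') j'
        else pvGet2 m0 i' j' := by
  intro t
  induction t with
  | zero => intro _; exact ⟨rfl, by intro i' j'; simp⟩
  | succ t ih =>
    intro ht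
    obtain ⟨ihs, ihv⟩ := ih (by omega)
    rw [List.range_succ, List.foldl_append, List.foldl_cons, List.foldl_nil]
    have hjn : (1 + 2 * (t : Int)).toNat = 1 + 2 * t := by omega
    obtain ⟨hs, hv⟩ := pvStepB m0 _ hpre ihs (1 + 2 * (t : Int)) (by rw [hjn]; omega)
      (by rw [hjn]; omega)
    refine ⟨hs, ?_⟩
    intro i' j'
    rw [hv i' j', hjn]
    by_cases hc : i' < m0.length ∧ j' = 1 + 2 * t
    · obtain ⟨h1, h2⟩ := hc
      subst h2
      rw [if_pos ⟨h1, rfl⟩, ihv, if_neg (by omega), if_pos ⟨by omega, by omega, h1⟩]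
    · rw [if_neg hc, ihv]
      split_ifs <;> first | rfl | omega

theorem pvB_char (m0 : List (List Int)) (hpre : Pre_misalign m0) :
    ((misalign_alt m0).map List.length = m0.map List.length) ∧
    ∀ i' j', pvGet2 (misalign_alt m0) i' j' =
      if j' % 2 = 1 ∧ j' < (m0.headD []).length ∧ i' < m0.length then
        pvGet2 m0 (m0.length - 1 - i') j'
      else pvGet2 m0 i' j' := by
  have hw : PySem.List.pyRange 1 ((m0.headD []).length) 2
      = (List.range ((m0.headD []).length / 2)).map (fun (k : Nat) => 1 + 2 * (k : Int)) := by
    rw [PySem.List.pyRange_of_pos _ _ (by norm_num)]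
    have hk : (if (1 : Int) < ((m0.headD []).length : Int) then
        ((((m0.headD []).length : Int) - 1 + 2 - 1) / 2).toNat else 0) = (m0.headD []).length / 2 := by
      split_ifs with h <;> omega
    rw [hk]
  have hdef : misalign_alt m0
      = (List.range ((m0.headD []).length / 2)).foldl
          (fun m (k : Nat) => stepB m0.length m (1 + 2 * (k : Int))) m0 := by
    show (PySem.List.pyRange 1 ((m0.headD []).length) 2).foldl (stepB m0.length) m0 = _
    rw [hw, List.foldl_map]
  rw [hdef]
  obtain ⟨hs, hv⟩ := pvB_inv m0 hpre ((m0.headD []).length / 2) le_rfl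
  refine ⟨hs, ?_⟩
  intro i' j'
  rw [hv i' j']
  split_ifs <;> first | rfl | omega

theorem pvStepA_skip (i : Nat) (m : List (List Int)) (j : Nat)
    (h : ¬(j % 2 = 1 ∧ i ≠ m.length / 2)) : stepA i m j = m := by
  unfold stepA; rw [if_neg h]

theorem pvStepA_swap (i : Nat) (m : List (List Int)) (j : Nat)
    (h : j % 2 = 1 ∧ i ≠ m.length / 2) :
    stepA i m j =
      pvSet2 (pvSet2 m i j (pvGet2 m (m.length - i - 1) j))
        ((pvSet2 m i j (pvGet2 m (m.length - i - 1) j)).length - i - 1) j (pvGet2 m i j) := by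
  unfold stepA; rw [if_pos h]

theorem pvSwap_char (m0 Gc : List (List Int))
    (ihs : Gc.map List.length = m0.map List.length) (i c : Nat)
    (hii : i < m0.length) (hne : i ≠ m0.length - 1 - i)
    (hr1 : c < (m0.getD i []).length) (hr2 : c < (m0.getD (m0.length - 1 - i) []).length) :
    ∀ i' j',
      pvGet2 (pvSet2 (pvSet2 Gc i c (pvGet2 Gc (Gc.length - i - 1) c))
        ((pvSet2 Gc i c (pvGet2 Gc (Gc.length - i - 1) c)).length - i - 1) c
        (pvGet2 Gc i c)) i' j' =
      if j' = c ∧ (i' = i ∨ i' = m0.length - 1 - i) then pvGet2 Gc (m0.length - 1 - i') c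
      else pvGet2 Gc i' j' := by
  intro i' j'
  have hlen := pvSh_len ihs
  have sh1 : (pvSet2 Gc i c (pvGet2 Gc (Gc.length - i - 1) c)).map List.length
      = m0.map List.length := by rw [pvShape_set2, ihs]
  have e1 := pvSh_len sh1
  have er := pvSh_row sh1
  have eg := pvSh_row ihs
  have hip : m0.length - 1 - i < m0.length := by omega
  rw [pvGet2_set2, pvGet2_set2, e1, er, eg, hlen,
    show m0.length - i - 1 = m0.length - 1 - i from by omega]
  by_cases hj : j' = c
  · subst hj
    by_cases hB : i' = m0.length - 1 - i
    · subst hB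
      rw [if_pos ⟨rfl, rfl, hip, hr2⟩, if_pos ⟨rfl, Or.inr rfl⟩,
        show m0.length - 1 - (m0.length - 1 - i) = i from by omega]
    · by_cases hA : i' = i
      · subst hA
        rw [if_neg (fun h => hB h.1), if_pos ⟨rfl, rfl, hii, hr1⟩, if_pos ⟨rfl, Or.inl rfl⟩]
      · rw [if_neg (fun h => hB h.1), if_neg (fun h => hA h.1),
          if_neg (fun h => by rcases h.2 with h' | h' <;> [exact hA h'; exact hB h'])]
  · rw [if_neg (fun h => hj h.2.1), if_neg (fun h => hj h.2.1), if_neg (fun h => hj h.1)]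

theorem pvInnerA_mid (m0 : List (List Int)) (c : Nat) :
    ∀ m, m.map List.length = m0.map List.length →
      (List.range c).foldl (stepA (m0.length / 2)) m = m := by
  induction c with
  | zero => intro m _; rfl
  | succ c ih =>
    intro m hsh
    rw [List.range_succ, List.foldl_append, List.foldl_cons, List.foldl_nil, ih m hsh,
      pvStepA_skip _ _ _ (fun h => h.2 (by rw [pvSh_len hsh]))]

theorem pvInnerA_char (m0 : List (List Int)) (hpre : Pre_misalign m0) (i : Nat)
    (hi : i < m0.length / 2) :
    ∀ (c : Nat), c ≤ (m0.headD []).length → ∀ m, m.map List.length = m0.map List.length →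
      (((List.range c).foldl (stepA i) m).map List.length = m0.map List.length) ∧
      ∀ i' j', pvGet2 ((List.range c).foldl (stepA i) m) i' j' =
        if j' % 2 = 1 ∧ j' < c ∧ (i' = i ∨ i' = m0.length - 1 - i) then
          pvGet2 m (m0.length - 1 - i') j'
        else pvGet2 m i' j' := by
  intro c
  induction c with
  | zero => intro _ m hsh; refine ⟨hsh, ?_⟩; intro i' j'; simp
  | succ c ih =>
    intro hc m hsh
    obtain ⟨ihs, ihv⟩ := ih (by omega) m hsh
    rw [List.range_succ, List.foldl_append, List.foldl_cons, List.foldl_nil]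
    have hlen := pvSh_len ihs
    by_cases hcodd : c % 2 = 1
    · have hii : i < m0.length := by omega
      have hne : i ≠ m0.length - 1 - i := by omega
      have hrow : ∀ k, k < m0.length → c < (m0.getD k []).length := by
        intro k hk
        have := hpre.2 (m0.getD k []) (by rw [List.getD_eq_getElem _ _ hk]; exact List.getElem_mem _)
        omega
      rw [pvStepA_swap i _ c ⟨hcodd, by rw [hlen]; omega⟩]
      refine ⟨by rw [pvShape_set2, pvShape_set2, ihs], ?_⟩
      intro i' j'
      rw [pvSwap_char m0 _ ihs i c hii hne (hrow i hii) (hrow _ (by omega))]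
      by_cases h1 : j' = c ∧ (i' = i ∨ i' = m0.length - 1 - i)
      · obtain ⟨hj, hio⟩ := h1
        subst hj
        rw [if_pos ⟨rfl, hio⟩, ihv, if_neg (by omega), if_pos ⟨hcodd, by omega, hio⟩]
      · rw [if_neg h1, ihv]
        split_ifs with h2 h3 <;> first | rfl | omega
    · rw [pvStepA_skip i _ c (fun h => hcodd h.1)]
      refine ⟨ihs, ?_⟩
      intro i' j'
      rw [ihv]
      split_ifs <;> first | rfl | omega

theorem pvA_inv (m0 : List (List Int)) (hpre : Pre_misalign m0) :
    ∀ k, k ≤ m0.length / 2 + 1 →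
      (((List.range k).foldl innerA m0).map List.length = m0.map List.length) ∧
      ∀ i' j', pvGet2 ((List.range k).foldl innerA m0) i' j' =
        if j' % 2 = 1 ∧ j' < (m0.headD []).length ∧ i' < m0.length ∧
            (i' < min k (m0.length / 2) ∨ m0.length - min k (m0.length / 2) ≤ i') then
          pvGet2 m0 (m0.length - 1 - i') j'
        else pvGet2 m0 i' j' := by
  intro k
  induction k with
  | zero =>
    intro _
    refine ⟨rfl, ?_⟩
    intro i' j'
    simp only [List.range_zero, List.foldl_nil]
    rw [if_neg (by omega)]
  | succ k ih =>
    intro hk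
    obtain ⟨ihs, ihv⟩ := ih (by omega)
    rw [List.range_succ, List.foldl_append, List.foldl_cons, List.foldl_nil]
    have hinner : ∀ mm : List (List Int), mm.map List.length = m0.map List.length →
        innerA mm k = (List.range ((m0.headD []).length)).foldl (stepA k) mm := by
      intro mm hmm
      unfold innerA
      rw [pvSh_head hmm]
    rw [hinner _ ihs]
    by_cases hkmid : k < m0.length / 2
    · obtain ⟨cs, cv⟩ := pvInnerA_char m0 hpre k hkmid ((m0.headD []).length) le_rfl _ ihs
      refine ⟨cs, ?_⟩
      intro i' j'
      rw [cv]
      by_cases h1 : j' % 2 = 1 ∧ j' < (m0.headD []).length ∧ (i' = k ∨ i' = m0.length - 1 - k)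
      · obtain ⟨ho, hw', hio⟩ := h1
        rcases hio with h' | h' <;> subst h' <;>
          rw [if_pos ⟨ho, hw', by tauto⟩, ihv, if_neg (by omega), if_pos (by omega)]
      · rw [if_neg (fun h => h1 ⟨h.1, by omega, h.2.2⟩), ihv]
        split_ifs <;> first | rfl | omega
    · have hkeq : k = m0.length / 2 := by omega
      subst hkeq
      rw [pvInnerA_mid m0 _ _ ihs]
      refine ⟨ihs, ?_⟩
      intro i' j'
      rw [ihv]
      split_ifs <;> first | rfl | omega

theorem pvA_char (m0 : List (List Int)) (hpre : Pre_misalign m0) :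
    ((misalign m0).map List.length = m0.map List.length) ∧
    ∀ i' j', pvGet2 (misalign m0) i' j' =
      if j' % 2 = 1 ∧ j' < (m0.headD []).length ∧ i' < m0.length then
        pvGet2 m0 (m0.length - 1 - i') j'
      else pvGet2 m0 i' j' := by
  obtain ⟨hs, hv⟩ := pvA_inv m0 hpre (m0.length / 2 + 1) le_rfl
  refine ⟨hs, ?_⟩
  intro i' j'
  rw [show misalign m0 = (List.range (m0.length / 2 + 1)).foldl innerA m0 from rfl, hv]
  by_cases hmid : j' % 2 = 1 ∧ j' < (m0.headD []).length ∧ i' < m0.length ∧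
      ¬(i' < m0.length / 2 ∨ m0.length - m0.length / 2 ≤ i')
  · rw [if_neg (by omega), if_pos ⟨hmid.1, hmid.2.1, hmid.2.2.1⟩,
      show m0.length - 1 - i' = i' from by omega]
  · split_ifs <;> first | rfl | omega

theorem pv_ext (m0 X Y : List (List Int))
    (hx : X.map List.length = m0.map List.length)
    (hy : Y.map List.length = m0.map List.length)
    (h : ∀ i j, pvGet2 X i j = pvGet2 Y i j) : X = Y := by
  apply List.ext_getElem (by rw [pvSh_len hx, pvSh_len hy])
  intro i h1 h2
  apply List.ext_getElem
  · have rx := pvSh_row hx i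
    have ry := pvSh_row hy i
    rw [List.getD_eq_getElem _ _ h1] at rx
    rw [List.getD_eq_getElem _ _ h2] at ry
    omega
  · intro j hj1 hj2
    have hg := h i j
    unfold pvGet2 at hg
    rw [List.getD_eq_getElem _ _ h1, List.getD_eq_getElem _ _ h2,
      List.getD_eq_getElem _ _ hj1, List.getD_eq_getElem _ _ hj2] at hg
    exact hg

-- ===== VERDICT (by name: the statement is the Claim_ definition above) =====
theorem misalign_spec : Claim_equal_misalign := by
  intro m _ hpre
  obtain ⟨as_, av⟩ := pvA_char m hpre
  obtain ⟨bs, bv⟩ := pvB_char m hpre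
  exact pv_ext m _ _ as_ bs (fun i j => by rw [av, bv])
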